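-- pv_equiv track=rewrite | github.com/caohung20/thesis_project | KERNELPF3.py | __getLineISL__
-- ===== SOURCE A (Python) =====
-- def __getLineISL__(busC0):
--     lineISL = set() # line can not be off => ISLAND
--     busC = busC0.copy()
--     while True:
--         n1 = len(lineISL)
--         for k,v in busC.items():
--             if len(v)==1:
--                 lineISL.update(v)
--         if n1==len(lineISL):
--             break
--         busc1 = dict()
--         for k,v in busC.items():
--             if len(v)!=1:
--                 busc1[k]=v-lineISL
--         busC = busc1.copy()
--     return lineISL,busC
-- ===== SOURCE B (Python) =====
-- def __getLineISL__(busC0):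
--     # Worklist-style propagation: index line -> buses once; each round only the
--     # buses touching newly islanded lines are updated, instead of re-subtracting
--     # the whole accumulated set from every bus.
--     rem = {k: set(v) for k, v in busC0.items()}
--     touches = {}
--     for k, v in busC0.items():
--         for l in v:
--             touches.setdefault(l, []).append(k)
--     acc = set()
--     while True:
--         new = []
--         for k, v in rem.items():
--             if len(v) == 1:
--                 (l,) = tuple(v)
--                 if l not in acc and l not in new:
--                     new.append(l)
--         if not new:
--             return acc, rem
--         rem = {k: v for k, v in rem.items() if len(v) != 1}
--         acc.update(new)
--         for l in new:
--             for k in touches[l]: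
--                 if k in rem:
--                     rem[k].discard(l)
-- ===== Notes on version B (the rewrite author's own statement) =====
-- stated objective: alternative
-- what changed: A re-scans every bus each round and re-subtracts the whole accumulated island set from every surviving value; B builds a line-to-buses index once and, per round, removes only the newly islanded lines from exactly the buses that touch them.
import Mathlib
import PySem

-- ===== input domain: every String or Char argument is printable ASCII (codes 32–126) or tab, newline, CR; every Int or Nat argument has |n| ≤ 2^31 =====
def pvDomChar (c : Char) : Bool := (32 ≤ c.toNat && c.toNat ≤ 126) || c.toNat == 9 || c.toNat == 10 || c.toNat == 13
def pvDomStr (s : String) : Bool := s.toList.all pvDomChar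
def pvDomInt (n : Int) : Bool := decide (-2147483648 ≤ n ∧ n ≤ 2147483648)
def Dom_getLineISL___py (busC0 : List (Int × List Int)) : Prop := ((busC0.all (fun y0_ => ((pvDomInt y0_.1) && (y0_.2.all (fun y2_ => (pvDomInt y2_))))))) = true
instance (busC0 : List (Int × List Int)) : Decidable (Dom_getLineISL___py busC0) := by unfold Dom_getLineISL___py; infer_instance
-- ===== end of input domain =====

-- B replaces A's per-round full rescan-and-resubtract with a line→buses index built once,
-- so each round only updates the buses touching newly islanded lines (objective: alternative).


-- ===== PORT A =====
-- for k,v in busC.items(): if len(v)==1: lineISL.update(v)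
def pyA_collect (s : List Int) (items : List (Int × List Int)) : List Int :=
  items.foldl (fun s kv => if kv.2.length == 1 then PySem.Set.update s kv.2 else s) s

-- busc1 = dict(); for k,v in busC.items(): if len(v)!=1: busc1[k] = v - lineISL
def pyA_rebuild (items : List (Int × List Int)) (lineISL : List Int) : PySem.Dict Int (List Int) :=
  items.foldl (fun d kv => if !(kv.2.length == 1) then d.insert kv.1 (PySem.Set.diff kv.2 lineISL) else d)
    PySem.Dict.empty

-- the 'while True' loop; fuel busC0.length + 1 suffices: every non-breaking pass drops ≥ 1 bus
def pyA_loop : Nat → List Int → PySem.Dict Int (List Int) → List Int × (List (Int × List Int))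
  | 0, s, busC => (s, busC.items)
  | fuel+1, s, busC =>
      let s' := pyA_collect s busC.items
      if s.length == s'.length then (s', busC.items)
      else pyA_loop fuel s' (pyA_rebuild busC.items s')

def getLineISL___py (busC0 : List (Int × List Int)) : List Int × (List (Int × List Int)) :=
  pyA_loop (busC0.length + 1) [] (PySem.Dict.mk busC0)

-- ===== PORT B =====
-- touches = {}; for k,v in busC0.items(): for l in v: touches.setdefault(l, []).append(k)
def pyB_touches (busC0 : List (Int × List Int)) : PySem.Dict Int (List Int) :=
  busC0.foldl (fun t kv => kv.2.foldl (fun t l => t.modify l [] (· ++ [kv.1])) t) PySem.Dict.empty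

-- new = []; for k,v in rem.items(): if len(v)==1: (l,)=tuple(v); if l not in acc and l not in new: new.append(l)
def pyB_new (acc : List Int) (items : List (Int × List Int)) : List Int :=
  items.foldl (fun nw kv =>
    if kv.2.length == 1 then
      match kv.2 with
      | [l] => if l ∈ acc ∨ l ∈ nw then nw else nw ++ [l]
      | _ => nw
    else nw) []

-- for l in new: for k in touches[l]: if k in rem: rem[k].discard(l)
def pyB_discards (touches : PySem.Dict Int (List Int)) (nw : List Int)
    (rem : PySem.Dict Int (List Int)) : PySem.Dict Int (List Int) :=
  nw.foldl (fun rem l =>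
    (touches.getD l []).foldl (fun rem k =>
      if rem.contains k then rem.modify k [] (fun v => PySem.Set.discard v l) else rem) rem) rem

-- the 'while True' loop (same fuel bound as A: each continuing round removes ≥ 1 bus)
def pyB_loop : Nat → List Int → PySem.Dict Int (List Int) → PySem.Dict Int (List Int) →
    List Int × (List (Int × List Int))
  | 0, acc, rem, _ => (acc, rem.items)
  | fuel+1, acc, rem, touches =>
      let nw := pyB_new acc rem.items
      if nw.isEmpty then (acc, rem.items)
      else
        let rem1 := PySem.Dict.mk (rem.items.filter (fun kv => !(kv.2.length == 1)))
        pyB_loop fuel (PySem.Set.update acc nw) (pyB_discards touches nw rem1) touches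

def getLineISL___py_alt (busC0 : List (Int × List Int)) : List Int × (List (Int × List Int)) :=
  pyB_loop (busC0.length + 1) []
    (PySem.Dict.mk (busC0.map (fun kv => (kv.1, PySem.Set.ofList kv.2))))
    (pyB_touches busC0)

-- ===== PRECONDITION & SPEC =====
-- Pre_ excludes association lists with duplicate bus keys or duplicate lines inside a value:
-- those do not encode a Python dict-of-sets argument (every real call passes a dict whose values
-- are sets), so behaviour there is an artefact of the list encoding.
def Pre_getLineISL___py (busC0 : List (Int × List Int)) : Prop :=
  (busC0.map (fun kv => kv.1)).Nodup ∧ ∀ p ∈ busC0, p.2.Nodup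
instance (busC0 : List (Int × List Int)) : Decidable (Pre_getLineISL___py busC0) := by
  unfold Pre_getLineISL___py; infer_instance

def pvWitness_getLineISL___py : (List (Int × List Int)) := [(1, [5]), (2, [5, 6]), (3, [])]

def Spec_getLineISL___py (busC0 : List (Int × List Int)) (out : List Int × (List (Int × List Int))) : Prop := out = getLineISL___py_alt busC0
instance (busC0 : List (Int × List Int)) (out : List Int × (List (Int × List Int))) : Decidable (Spec_getLineISL___py busC0 out) := by unfold Spec_getLineISL___py; infer_instance

-- ===== CLAIM (what is proved, stated in full; the proofs are below) =====
def Claim_equal_getLineISL___py : Prop := ∀ (busC0 : List (Int × List Int)), Dom_getLineISL___py busC0 → Pre_getLineISL___py busC0 → Spec_getLineISL___py busC0 (getLineISL___py busC0)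

-- ===== LEMMAS AND PROOFS =====

-- A's singleton scan, started from acc ++ nw, appends exactly the lines B's scan appends to nw.
lemma collect_eq (acc : List Int) : ∀ (items : List (Int × List Int)) (nw : List Int),
    pyA_collect (acc ++ nw) items
      = acc ++ items.foldl (fun nw kv =>
          if kv.2.length == 1 then
            match kv.2 with
            | [l] => if l ∈ acc ∨ l ∈ nw then nw else nw ++ [l]
            | _ => nw
          else nw) nw := by
  intro items
  induction items with
  | nil => intro nw; simp [pyA_collect]
  | cons kv rest ih =>
    intro nw
    by_cases h1 : kv.2.length = 1
    · obtain ⟨l, hl⟩ : ∃ l, kv.2 = [l] := by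
        cases kv2 : kv.2 with
        | nil => simp [kv2] at h1
        | cons a t => cases t with
          | nil => exact ⟨a, rfl⟩
          | cons b t2 => simp [kv2] at h1
      have hupd : PySem.Set.update (acc ++ nw) kv.2
          = if l ∈ acc ∨ l ∈ nw then acc ++ nw else acc ++ (nw ++ [l]) := by
        simp only [hl, PySem.Set.update, List.foldl_cons, List.foldl_nil,
          PySem.Set.add_eq_ite, List.mem_append, List.append_assoc]
      by_cases hm : l ∈ acc ∨ l ∈ nw
      · simp only [pyA_collect, List.foldl_cons, h1, hl] at *
        simpa [hm, hupd] using ih nw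
      · simp only [pyA_collect, List.foldl_cons, h1, hl] at *
        simpa [hm, hupd] using ih (nw ++ [l])
    · simp only [pyA_collect, List.foldl_cons,
        show (kv.2.length == 1) = false by simp [h1]] at *
      simpa using ih nw

lemma pyB_new_spec (acc : List Int) (items : List (Int × List Int)) :
    pyA_collect acc items = acc ++ pyB_new acc items := by
  have := collect_eq acc items []
  simpa [pyB_new] using this

lemma nodup_collect (items : List (Int × List Int)) : ∀ (s : List Int), s.Nodup →
    (pyA_collect s items).Nodup := by
  induction items with
  | nil => intro s hs; simpa [pyA_collect] using hs
  | cons kv rest ih =>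
    intro s hs
    simp only [pyA_collect, List.foldl_cons]
    by_cases h1 : (kv.2.length == 1) = true
    · simp only [h1, if_pos]
      exact ih _ (PySem.Set.nodup_update _ _ hs)
    · simp only [h1, if_neg]; exact ih _ hs

-- A's rebuild pass, as a filter-and-map of the items list.
lemma rebuild_items (items : List (Int × List Int)) (s : List Int)
    (hnd : (items.map (fun kv => kv.1)).Nodup) :
    (pyA_rebuild items s).items
      = (items.filter (fun kv => !(kv.2.length == 1))).map
          (fun kv => (kv.1, PySem.Set.diff kv.2 s)) := by
  have hf : pyA_rebuild items s
      = (items.filter (fun kv => !(kv.2.length == 1))).foldl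
          (fun d kv => d.insert kv.1 (PySem.Set.diff kv.2 s)) PySem.Dict.empty := by
    rw [pyA_rebuild, List.foldl_filter]
  rw [hf]
  have hnd' : ((items.filter (fun kv => !(kv.2.length == 1))).map (fun kv => kv.1)).Nodup := by
    have hsub : (items.filter (fun kv => !(kv.2.length == 1))).map (fun kv => kv.1)
        |>.Sublist (items.map (fun kv => kv.1)) :=
      List.filter_sublist.map _
    exact hnd.sublist hsub
  have := PySem.Dict.items_foldl_insert_fresh
    (l := items.filter (fun kv => !(kv.2.length == 1)))
    (k := fun kv => kv.1) (v := fun kv => PySem.Set.diff kv.2 s)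
    (d := PySem.Dict.empty)
    (by intro a _; simp [PySem.Dict.contains_empty]) hnd'
  simpa [PySem.Dict.empty] using this

-- one guarded in-place discard, as a pointwise map over the items list
lemma step_items (d : PySem.Dict Int (List Int)) (k l : Int) (hk : d.keys.Nodup) :
    (if d.contains k then d.modify k [] (fun v => PySem.Set.discard v l) else d).items
      = d.items.map (fun p => if p.1 == k then (p.1, PySem.Set.discard p.2 l) else p) := by
  by_cases hc : d.contains k = true
  · rw [if_pos hc]
    rw [PySem.Dict.modify, PySem.Dict.items_insert_of_contains _ _ hc]
    apply List.map_congr_left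
    intro p hp
    by_cases hpk : (p.1 == k) = true
    · have hpk' : p.1 = k := by simpa using hpk
      have hget : d.getD k [] = p.2 := by
        have : (k, p.2) ∈ d.items := by rw [← hpk']; exact hp
        exact PySem.Dict.getD_of_mem_items _ this hk []
      simp [hpk, hget, hpk']
    · simp [hpk]
  · rw [if_neg hc]
    have hnone : ∀ p ∈ d.items, (p.1 == k) = false := by
      intro p hp
      by_contra hne
      have : d.contains k = true := by
        simp only [PySem.Dict.contains, List.any_eq_true]
        exact ⟨p, hp, by simpa using hne⟩
      exact hc this
    conv_lhs => rw [show d.items = d.items.map id by simp]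
    apply List.map_congr_left
    intro p hp
    simp [hnone p hp]

lemma step_keys (d : PySem.Dict Int (List Int)) (k l : Int) (hk : d.keys.Nodup) :
    (if d.contains k then d.modify k [] (fun v => PySem.Set.discard v l) else d).keys = d.keys := by
  rw [PySem.Dict.keys, step_items d k l hk, List.map_map, PySem.Dict.keys]
  apply List.map_congr_left
  intro p _
  by_cases hpk : p.1 = k <;> simp [hpk]

-- the inner 'for k in touches[l]' loop: pointwise discard of l from every entry it covers
lemma ksfold_items (l : Int) : ∀ (ks : List Int), ks.Nodup →
    ∀ (d : PySem.Dict Int (List Int)), d.keys.Nodup →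
    (ks.foldl (fun d k =>
        if d.contains k then d.modify k [] (fun v => PySem.Set.discard v l) else d) d).items
      = d.items.map (fun p => if p.1 ∈ ks then (p.1, PySem.Set.discard p.2 l) else p) := by
  intro ks
  induction ks with
  | nil =>
    intro _ d _
    simp
  | cons k rest ih =>
    intro hnd d hk
    have hknotin : k ∉ rest := (List.nodup_cons.mp hnd).1
    have hrest : rest.Nodup := (List.nodup_cons.mp hnd).2
    set d' := if d.contains k then d.modify k [] (fun v => PySem.Set.discard v l) else d with hd'
    have hk' : d'.keys.Nodup := by rw [hd', step_keys d k l hk]; exact hk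
    rw [List.foldl_cons, ← hd', ih hrest d' hk', hd', step_items d k l hk, List.map_map]
    apply List.map_congr_left
    intro p _
    by_cases hpk : (p.1 == k) = true
    · have hpk' : p.1 = k := by simpa using hpk
      simp [hpk, hpk', hknotin]
    · have hpk' : ¬ p.1 = k := by simpa using hpk
      by_cases hin : p.1 ∈ rest <;> simp [hpk, hpk', hin, Function.comp]

-- covered fold = unconditional pointwise discard (uncovered entries do not contain l)
lemma ksfold_items_cov (l : Int) (ks : List Int) (hksnd : ks.Nodup)
    (d : PySem.Dict Int (List Int)) (hk : d.keys.Nodup)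
    (hcov : ∀ p ∈ d.items, l ∈ p.2 → p.1 ∈ ks) :
    (ks.foldl (fun d k =>
        if d.contains k then d.modify k [] (fun v => PySem.Set.discard v l) else d) d).items
      = d.items.map (fun p => (p.1, PySem.Set.discard p.2 l)) := by
  rw [ksfold_items l ks hksnd d hk]
  apply List.map_congr_left
  intro p hp
  by_cases hin : p.1 ∈ ks
  · simp [hin]
  · have hlnot : l ∉ p.2 := fun hl => hin (hcov p hp hl)
    have : PySem.Set.discard p.2 l = p.2 := by
      unfold PySem.Set.discard
      apply List.filter_eq_self.mpr
      intro a ha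
      simp only [Bool.not_eq_eq_eq_not, Bool.not_true, beq_eq_false_iff_ne, ne_eq]
      intro h; exact hlnot (h ▸ ha)
    simp [hin, this]

-- the whole 'for l in new' loop: every surviving value loses every line of nw
lemma discards_items (T : PySem.Dict Int (List Int)) (htnd : ∀ l, (T.getD l []).Nodup) :
    ∀ (nw : List Int) (rem : PySem.Dict Int (List Int)), rem.keys.Nodup →
    (∀ p ∈ rem.items, ∀ l ∈ p.2, p.1 ∈ T.getD l []) →
    (pyB_discards T nw rem).items
      = rem.items.map (fun p => (p.1, nw.foldl PySem.Set.discard p.2)) := by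
  intro nw
  induction nw with
  | nil =>
    intro rem _ _
    simp [pyB_discards]
  | cons l rest ih =>
    intro rem hk hcov
    simp only [pyB_discards, List.foldl_cons]
    set rem' := (T.getD l []).foldl (fun d k =>
        if d.contains k then d.modify k [] (fun v => PySem.Set.discard v l) else d) rem with hrem'
    have hitems' : rem'.items = rem.items.map (fun p => (p.1, PySem.Set.discard p.2 l)) :=
      ksfold_items_cov l _ (htnd l) rem hk (fun p hp hl => hcov p hp l hl)
    have hkeys' : rem'.keys.Nodup := by
      rw [PySem.Dict.keys, hitems', List.map_map]
      simpa [Function.comp, PySem.Dict.keys] using hk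
    have hcov' : ∀ p ∈ rem'.items, ∀ x ∈ p.2, p.1 ∈ T.getD x [] := by
      intro p hp x hx
      rw [hitems'] at hp
      obtain ⟨q, hq, rfl⟩ := List.mem_map.mp hp
      have hxq : x ∈ q.2 := by
        have := (PySem.Set.mem_discard _ _ _).mp hx
        exact this.1
      exact hcov q hq x hxq
    have := ih rem' hkeys' hcov'
    rw [show (pyB_discards T rest rem') = rest.foldl (fun rem l =>
        (T.getD l []).foldl (fun rem k =>
          if rem.contains k then rem.modify k [] (fun v => PySem.Set.discard v l) else rem) rem) rem'
      from rfl] at this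
    rw [this, hitems', List.map_map]
    rfl

-- discarding each line of nw in turn = one set difference by nw
lemma foldl_discard_eq_diff : ∀ (nw : List Int) (v : List Int),
    nw.foldl PySem.Set.discard v = PySem.Set.diff v nw := by
  intro nw
  induction nw with
  | nil => intro v; simp [PySem.Set.diff]
  | cons l rest ih =>
    intro v
    rw [List.foldl_cons, ih]
    unfold PySem.Set.diff PySem.Set.discard
    rw [List.filter_filter]
    apply List.filter_congr
    intro a _
    by_cases hal : a = l <;> simp [hal]

-- values disjoint from acc: subtracting acc ++ nw is subtracting nw
lemma diff_append_of_disjoint (v acc nw : List Int) (hdisj : ∀ x ∈ v, x ∉ acc) :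
    PySem.Set.diff v (acc ++ nw) = PySem.Set.diff v nw := by
  unfold PySem.Set.diff
  apply List.filter_congr
  intro a ha
  simp [hdisj a ha]

-- nested setdefault/append loop flattened to one (line, bus) pair stream
lemma touches_flat : ∀ (bs : List (Int × List Int)) (t : PySem.Dict Int (List Int)),
    bs.foldl (fun t kv => kv.2.foldl (fun t l => t.modify l [] (· ++ [kv.1])) t) t
      = (bs.flatMap (fun kv => kv.2.map (fun x => (x, kv.1)))).foldl
          (fun t p => t.modify p.1 [] (· ++ [p.2])) t := by
  intro bs
  induction bs with
  | nil => intro t; simp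
  | cons kv rest ih =>
    intro t
    rw [List.foldl_cons, List.flatMap_cons, List.foldl_append, ih, List.foldl_map]

lemma nodup_filter_beq (l : Int) : ∀ (v : List Int), v.Nodup →
    v.filter (fun x => x == l) = if l ∈ v then [l] else [] := by
  intro v hv
  rw [List.filter_beq]
  by_cases hm : l ∈ v
  · rw [List.count_eq_one_of_mem hv hm]; simp [hm]
  · rw [List.count_eq_zero_of_not_mem hm]; simp [hm]

-- characterization of the line→buses index
lemma touches_getD (busC0 : List (Int × List Int)) (hv : ∀ p ∈ busC0, p.2.Nodup) (l : Int) :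
    (pyB_touches busC0).getD l []
      = (busC0.filter (fun kv => kv.2.contains l)).map (fun kv => kv.1) := by
  rw [pyB_touches, touches_flat]
  rw [PySem.Dict.getD_foldl_modify_append]
  rw [PySem.Dict.getD_empty]
  rw [List.nil_append]
  induction busC0 with
  | nil => simp
  | cons kv rest ih =>
    have hkv : kv.2.Nodup := hv kv (by simp)
    have hrest : ∀ p ∈ rest, p.2.Nodup := fun p hp => hv p (by simp [hp])
    rw [List.flatMap_cons, List.filter_append, List.map_append, ih hrest]
    congr 1
    rw [List.filter_map]
    have : (fun p : Int × Int => p.1 == l) ∘ (fun x => (x, kv.1)) = fun x => x == l := rfl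
    rw [this, nodup_filter_beq l kv.2 hkv]
    by_cases hm : l ∈ kv.2
    · simp [hm, List.filter_cons, show kv.2.contains l = true by simpa using hm]
    · simp [hm, List.filter_cons, show kv.2.contains l = false by simpa using hm]

lemma touches_getD_nodup (busC0 : List (Int × List Int))
    (hk : (busC0.map (fun kv => kv.1)).Nodup) (hv : ∀ p ∈ busC0, p.2.Nodup) (l : Int) :
    ((pyB_touches busC0).getD l []).Nodup := by
  rw [touches_getD busC0 hv l]
  exact hk.sublist (List.filter_sublist.map _)

-- main loop correspondence
lemma loop_eq (T : PySem.Dict Int (List Int)) (htnd : ∀ l, (T.getD l []).Nodup) :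
    ∀ (fuel : Nat) (acc : List Int) (d : PySem.Dict Int (List Int)),
    acc.Nodup → d.keys.Nodup →
    (∀ p ∈ d.items, ∀ x ∈ p.2, x ∉ acc) →
    (∀ p ∈ d.items, ∀ l ∈ p.2, p.1 ∈ T.getD l []) →
    pyA_loop fuel acc d = pyB_loop fuel acc d T := by
  intro fuel
  induction fuel with
  | zero => intro acc d _ _ _ _; rfl
  | succ fuel ih =>
    intro acc d hacc hkeys hdisj hcov
    have hc : pyA_collect acc d.items = acc ++ pyB_new acc d.items := pyB_new_spec acc d.items
    have hnodup_all : (acc ++ pyB_new acc d.items).Nodup := by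
      rw [← hc]; exact nodup_collect d.items acc hacc
    set nw := pyB_new acc d.items with hnw
    have hcond : (acc.length == (pyA_collect acc d.items).length) = nw.isEmpty := by
      rw [hc]
      cases nw with
      | nil => simp
      | cons a t => simp [beq_iff_eq]
    have hA : pyA_loop (fuel+1) acc d
        = if acc.length == (pyA_collect acc d.items).length
          then (pyA_collect acc d.items, d.items)
          else pyA_loop fuel (pyA_collect acc d.items)
                 (pyA_rebuild d.items (pyA_collect acc d.items)) := rfl
    have hB : pyB_loop (fuel+1) acc d T
        = if nw.isEmpty then (acc, d.items)
          else pyB_loop fuel (PySem.Set.update acc nw)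
                 (pyB_discards T nw
                   (PySem.Dict.mk (d.items.filter (fun kv => !(kv.2.length == 1))))) T := rfl
    rw [hA, hB, hcond]
    by_cases hemp : nw.isEmpty = true
    · have hnil : nw = [] := List.isEmpty_iff.mp hemp
      rw [if_pos hemp, if_pos hemp, hc, hnil, List.append_nil]
    · have hnwnd : nw.Nodup := (List.nodup_append.mp hnodup_all).2.1
      have hnwdisj : ∀ x ∈ nw, x ∉ acc := by
        intro x hx hxa
        exact List.disjoint_of_nodup_append hnodup_all hxa hx
      rw [if_neg hemp, if_neg hemp]
      have hupd : PySem.Set.update acc nw = acc ++ nw :=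
        PySem.Set.update_eq_append_of_disjoint _ _ hnwnd hnwdisj
      set F0 := d.items.filter (fun kv => !(kv.2.length == 1)) with hF0
      have hF0sub : ∀ p ∈ F0, p ∈ d.items := fun p hp => List.mem_of_mem_filter hp
      have hF0knd : (F0.map (fun kv => kv.1)).Nodup :=
        hkeys.sublist (List.filter_sublist.map _)
      have hrem1_items : (PySem.Dict.mk F0).items = F0 := rfl
      have hrem1_keys : (PySem.Dict.mk F0).keys.Nodup := by
        simpa [PySem.Dict.keys, hrem1_items] using hF0knd
      have hrem1_cov : ∀ p ∈ (PySem.Dict.mk F0).items, ∀ l ∈ p.2, p.1 ∈ T.getD l [] := by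
        intro p hp l hl
        exact hcov p (hF0sub p (by simpa [hrem1_items] using hp)) l hl
      have hBitems : (pyB_discards T nw (PySem.Dict.mk F0)).items
          = F0.map (fun p => (p.1, PySem.Set.diff p.2 (acc ++ nw))) := by
        rw [discards_items T htnd nw (PySem.Dict.mk F0) hrem1_keys hrem1_cov, hrem1_items]
        apply List.map_congr_left
        intro p hp
        rw [foldl_discard_eq_diff]
        rw [diff_append_of_disjoint p.2 acc nw
          (fun x hx => hdisj p (hF0sub p hp) x hx)]
      have hAitems : (pyA_rebuild d.items (pyA_collect acc d.items)).items
          = F0.map (fun p => (p.1, PySem.Set.diff p.2 (acc ++ nw))) := by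
        rw [rebuild_items d.items _ hkeys, hc, ← hF0]
      have hdicts : pyA_rebuild d.items (pyA_collect acc d.items)
          = pyB_discards T nw (PySem.Dict.mk F0) := by
        apply PySem.Dict.ext
        rw [hAitems, hBitems]
      rw [hdicts, hc, ← hupd]
      -- apply IH with re-established invariants
      apply ih
      · rw [hupd]; exact hnodup_all
      · rw [PySem.Dict.keys, hBitems, List.map_map]
        simpa [Function.comp, PySem.Dict.keys] using hF0knd
      · intro p hp x hx
        rw [hBitems] at hp
        obtain ⟨q, _, rfl⟩ := List.mem_map.mp hp
        have := (PySem.Set.mem_diff _ _ _).mp hx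
        rw [hupd]
        exact this.2
      · intro p hp l hl
        rw [hBitems] at hp
        obtain ⟨q, hq, rfl⟩ := List.mem_map.mp hp
        have hlq : l ∈ q.2 := ((PySem.Set.mem_diff _ _ _).mp hl).1
        exact hcov q (hF0sub q hq) l hlq

-- ===== VERDICT (by name: the statement is the Claim_ definition above) =====
theorem getLineISL___py_spec : Claim_equal_getLineISL___py := by
  intro busC0 _ hpre
  obtain ⟨hk, hv⟩ := hpre
  unfold Spec_getLineISL___py getLineISL___py getLineISL___py_alt
  have hmk : busC0.map (fun kv => (kv.1, PySem.Set.ofList kv.2)) = busC0 := by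
    have : ∀ kv ∈ busC0, (kv.1, PySem.Set.ofList kv.2) = kv := by
      intro kv hkv
      obtain ⟨a, b⟩ := kv
      rw [PySem.Set.ofList_eq_self_of_nodup _ (hv ⟨a, b⟩ hkv)]
    rw [List.map_congr_left this]
    simp
  rw [hmk]
  apply loop_eq
  · exact touches_getD_nodup busC0 hk hv
  · exact List.nodup_nil
  · simpa [PySem.Dict.keys] using hk
  · intro p _ x _; simp
  · intro p hp l hl
    rw [touches_getD busC0 hv l]
    have hpf : p ∈ busC0.filter (fun kv => kv.2.contains l) := by
      rw [List.mem_filter]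
      exact ⟨hp, by simpa using hl⟩
    exact List.mem_map.mpr ⟨p, hpf, rfl⟩
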